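-- pv_equiv track=rewrite | github.com/playsam32/oddments | 성균관대학교/2020313793.정우성.HW3.py | helper_nspaces
-- ===== SOURCE A (Python) =====
-- WIDTH = 80
--
-- MINSPACES = 1
--
-- MAXSPACES = 5
--
-- def helper_nspaces(maxdigit, cols):
--     '''Calculate how many nspaces(=whitespaces) is needed between numbers and
--     return the whitespaces as much as needed.
--
--     This is the function which is made to help print_ranodms().
--     The needed space for pretty one line:
--         maxdigit * cols + defalut_nspaces * (cols - 1).
--     Increase number of nspaces(=nspaces_num) one by one comparing with WIDTH.
--     And find the number of nspaces which is nearest to 5.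
--     But, if (maxdigits*cols + (cols - 1)) > WIDTH, nspaces_num = 1
--     After find the numbers of nspaces, return the compilation of whitespaces.
--
--     :param maxdigit: number of digits required to print the longest number
--                      in range.
--     :type maxdigit:  int
--
--     :param cols: the number of printed numbers in one line.
--     :type cols:  int
--
--     :return: compilation of calculated whitespaces.
--     :rtype:  str
--
--     :precondition:
--         The following constants should be defined:
--             MINSPACES:
--                 minimum number of nspace
--             MAXSPACES:
--                 maximum number of naspaces
--             WIDTH:
--                 maximum number of characters that can be printed on one line
--
--     example:
--         maxdigit: 3   cols: 4  returns '     '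
--         maxdigit: 12  cols: 7  returns ' '
--     '''
--     # Start with one digit by default value and gradually increase it nearby 5.
--     nspaces_num = MINSPACES
--
--     # Check wheter the line to be printed is longer than WIDTH.
--     if maxdigit * cols + nspaces_num * (cols - 1) > WIDTH:
--         # As line is longer than WIDTH, nspaces_num is MINSPACES.
--         pass
--
--     # With default value of nspaces_num, line is shorter than WIDTH.
--     else:
--         #
--         # Increase nspaces_num until the first moment when calculation value is
--         # bigger than WIDTH, and then use the (nspaces_num - 1) which is the
--         # greatest value smaller than WIDTH.
--         #
--
--         # Find the first moment when calculation value is bigger than WIDTH.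
--         while MINSPACES <= nspaces_num <= MAXSPACES:
--             if maxdigit * cols + nspaces_num * (cols - 1) > WIDTH:
--                 break
--             # Increase nspaces_num to make it nearby 5.
--             nspaces_num += 1
--
--         # Subtract 1 to make the greatest calculation value smaller than WIDTH.
--         nspaces_num -= 1
--
--     return ' ' * nspaces_num
-- ===== SOURCE B (Python) =====
-- WIDTH = 80
--
-- MINSPACES = 1
--
-- MAXSPACES = 5
--
-- def helper_nspaces(maxdigit, cols):
--     # Closed form instead of the increment-until-break loop:
--     # the line width maxdigit*cols + n*(cols-1) is monotone in n, so the answer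
--     # is a direct clamp of the floor-division solution into [MINSPACES, MAXSPACES].
--     if maxdigit * cols + MINSPACES * (cols - 1) > WIDTH:
--         n = MINSPACES
--     elif cols <= 1:
--         # width does not grow with n (cols-1 <= 0), so the maximum fits
--         n = MAXSPACES
--     else:
--         n = min(MAXSPACES, (WIDTH - maxdigit * cols) // (cols - 1))
--     return ' ' * n
-- ===== Notes on version B (the rewrite author's own statement) =====
-- stated objective: simpler
-- what changed: Replaced the increment-until-break search loop with a direct closed-form clamp: for cols>=2 the answer is min(MAXSPACES, (WIDTH-maxdigit*cols)//(cols-1)), with the overflow and cols<=1 cases handled by two plain branches.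
import Mathlib
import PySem

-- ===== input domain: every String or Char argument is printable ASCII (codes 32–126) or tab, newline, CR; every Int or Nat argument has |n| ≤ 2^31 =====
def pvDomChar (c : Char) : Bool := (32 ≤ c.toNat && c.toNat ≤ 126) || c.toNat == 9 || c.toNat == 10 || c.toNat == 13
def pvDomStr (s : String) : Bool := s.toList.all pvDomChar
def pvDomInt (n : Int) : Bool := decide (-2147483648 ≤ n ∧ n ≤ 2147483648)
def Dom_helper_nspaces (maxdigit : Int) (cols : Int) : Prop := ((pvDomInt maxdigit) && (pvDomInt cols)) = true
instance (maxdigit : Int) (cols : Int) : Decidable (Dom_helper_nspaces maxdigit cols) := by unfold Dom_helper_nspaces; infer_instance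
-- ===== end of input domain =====

-- B replaces A's increment-until-break loop with a closed-form clamp of the floor-division solution (objective: simpler).

-- ' ' * n  (Python str repetition; exact: empty for n ≤ 0)
def pvSpaces (n : Int) : String := String.ofList (PySem.List.pyRepeat [' '] n)

-- ===== PORT A =====
-- the 'while MINSPACES <= nspaces_num <= MAXSPACES' loop; fuel 6 suffices since
-- nspaces_num starts at 1 and the guard fails once it reaches 6
def pvLoopA (maxdigit : Int) (cols : Int) (n : Int) : Nat → Int
  | 0 => n
  | fuel + 1 =>
    if 1 ≤ n ∧ n ≤ 5 then
      if maxdigit * cols + n * (cols - 1) > 80 then n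
      else pvLoopA maxdigit cols (n + 1) fuel
    else n

def helper_nspaces (maxdigit : Int) (cols : Int) : String :=
  if maxdigit * cols + 1 * (cols - 1) > 80 then
    pvSpaces 1
  else
    pvSpaces (pvLoopA maxdigit cols 1 6 - 1)

-- ===== PORT B =====
def helper_nspaces_alt (maxdigit : Int) (cols : Int) : String :=
  pvSpaces
    (if maxdigit * cols + 1 * (cols - 1) > 80 then 1
     else if cols ≤ 1 then 5
     else min 5 (PySem.Int.floordiv (80 - maxdigit * cols) (cols - 1)))

-- ===== PRECONDITION & SPEC =====
def Spec_helper_nspaces (maxdigit : Int) (cols : Int) (out : String) : Prop := out = helper_nspaces_alt maxdigit cols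
instance (maxdigit : Int) (cols : Int) (out : String) : Decidable (Spec_helper_nspaces maxdigit cols out) := by unfold Spec_helper_nspaces; infer_instance

-- ===== CLAIM (what is proved, stated in full; the proofs are below) =====
def Claim_equal_helper_nspaces : Prop := ∀ (maxdigit : Int) (cols : Int), Dom_helper_nspaces maxdigit cols → Spec_helper_nspaces maxdigit cols (helper_nspaces maxdigit cols)

-- ===== LEMMAS AND PROOFS =====

-- one loop iteration that continues
theorem pvLoopA_step (md c n m : Int) (fuel : Nat) (hm : m = n + 1) (h1 : 1 ≤ n) (h2 : n ≤ 5)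
    (hcost : ¬ md * c + n * (c - 1) > 80) :
    pvLoopA md c n (fuel + 1) = pvLoopA md c m fuel := by
  subst hm; simp [pvLoopA, h1, h2, hcost]

-- one loop iteration that breaks
theorem pvLoopA_break (md c n : Int) (fuel : Nat) (h1 : 1 ≤ n) (h2 : n ≤ 5)
    (hcost : md * c + n * (c - 1) > 80) :
    pvLoopA md c n (fuel + 1) = n := by
  simp [pvLoopA, h1, h2, hcost]

-- the while-guard fails
theorem pvLoopA_exit (md c n : Int) (fuel : Nat) (h : ¬ (1 ≤ n ∧ n ≤ 5)) :
    pvLoopA md c n (fuel + 1) = n := by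
  simp [pvLoopA, h]

-- the two nspaces counts agree
theorem pv_count_eq (md c : Int) (h : ¬ md * c + 1 * (c - 1) > 80) :
    pvLoopA md c 1 6 - 1
      = (if c ≤ 1 then (5:Int) else min 5 (PySem.Int.floordiv (80 - md * c) (c - 1))) := by
  by_cases hc : c ≤ 1
  · -- cols ≤ 1: width does not grow with n, the loop runs until the guard fails at 6
    rw [if_pos hc, show (6:Nat) = 5+1 from rfl,
        pvLoopA_step md c 1 2 _ (by norm_num) (by omega) (by omega) (by omega),
        pvLoopA_step md c 2 3 _ (by norm_num) (by omega) (by omega) (by omega),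
        pvLoopA_step md c 3 4 _ (by norm_num) (by omega) (by omega) (by omega),
        pvLoopA_step md c 4 5 _ (by norm_num) (by omega) (by omega) (by omega),
        pvLoopA_step md c 5 6 _ (by norm_num) (by omega) (by omega) (by omega),
        pvLoopA_exit md c 6 _ (by omega)]
    norm_num
  · -- cols ≥ 2: the loop finds exactly the clamp of the floor-division solution
    rw [if_neg hc]
    have hpos : (0:Int) < c - 1 := by omega
    have hle : ∀ q : Int, q ≤ PySem.Int.floordiv (80 - md * c) (c - 1) ↔ q * (c - 1) ≤ 80 - md * c :=
      fun q => PySem.Int.le_floordiv_iff_mul_le hpos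
    have hlt : ∀ q : Int, PySem.Int.floordiv (80 - md * c) (c - 1) < q ↔ 80 - md * c < q * (c - 1) :=
      fun q => PySem.Int.floordiv_lt_iff_lt_mul hpos
    rw [show (6:Nat) = 5+1 from rfl, pvLoopA_step md c 1 2 _ (by norm_num) (by omega) (by omega) (by omega)]
    by_cases h2 : md * c + 2 * (c - 1) > 80
    · rw [pvLoopA_break md c 2 _ (by omega) (by omega) h2]
      have := (hle 1).mpr; have := (hlt 2).mpr; omega
    rw [pvLoopA_step md c 2 3 _ (by norm_num) (by omega) (by omega) h2]
    by_cases h3 : md * c + 3 * (c - 1) > 80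
    · rw [pvLoopA_break md c 3 _ (by omega) (by omega) h3]
      have := (hle 2).mpr; have := (hlt 3).mpr; omega
    rw [pvLoopA_step md c 3 4 _ (by norm_num) (by omega) (by omega) h3]
    by_cases h4 : md * c + 4 * (c - 1) > 80
    · rw [pvLoopA_break md c 4 _ (by omega) (by omega) h4]
      have := (hle 3).mpr; have := (hlt 4).mpr; omega
    rw [pvLoopA_step md c 4 5 _ (by norm_num) (by omega) (by omega) h4]
    by_cases h5 : md * c + 5 * (c - 1) > 80
    · rw [pvLoopA_break md c 5 _ (by omega) (by omega) h5]
      have := (hle 4).mpr; have := (hlt 5).mpr; omega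
    rw [pvLoopA_step md c 5 6 _ (by norm_num) (by omega) (by omega) h5,
        pvLoopA_exit md c 6 _ (by omega)]
    have := (hle 5).mpr; omega

-- ===== VERDICT (by name: the statement is the Claim_ definition above) =====
theorem helper_nspaces_spec : Claim_equal_helper_nspaces := by
  intro md c _
  unfold Spec_helper_nspaces helper_nspaces helper_nspaces_alt
  rw [← apply_ite pvSpaces]
  refine congrArg pvSpaces ?_
  by_cases h : md * c + 1 * (c - 1) > 80
  · rw [if_pos h, if_pos h]
  · rw [if_neg h, if_neg h]
    exact pv_count_eq md c h
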